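-- pv_equiv track=rewrite | github.com/adarsa/FraminghamRashomonSet | utils.py | count_contradictions
-- ===== SOURCE A (Python) =====
-- def count_contradictions(rules_list, feature_names=None):
--     contradictory_features = set()
--
--     if feature_names is None:
--         feature_names = sorted(
--             {
--                 feat
--                 for rules in rules_list
--                 for feat in rules.keys()
--             }
--         )
--
--     for feat in feature_names:
--         dirs = [r.get(feat) for r in rules_list if feat in r]
--         if len(set(dirs)) > 1:
--             contradictory_features.add(feat)
--
--     return len(contradictory_features)
-- ===== SOURCE B (Python) =====
-- def count_contradictions(rules_list, feature_names=None):
--     # One pass over all rule entries: feature -> set of directions seen.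
--     dirs = {}
--     for r in rules_list:
--         for feat, direction in r.items():
--             dirs.setdefault(feat, set()).add(direction)
--     if feature_names is None:
--         return sum(1 for s in dirs.values() if len(s) > 1)
--     return sum(1 for feat in set(feature_names) if len(dirs.get(feat, ())) > 1)
-- ===== Notes on version B (the rewrite author's own statement) =====
-- stated objective: faster
-- what changed: A rescans the whole rules_list once per feature name (building a direction list per feature); B makes a single pass over all rule entries building a dict feature -> set of directions, then counts the entries (or the given feature names) whose set has more than one direction.
import Mathlib
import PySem

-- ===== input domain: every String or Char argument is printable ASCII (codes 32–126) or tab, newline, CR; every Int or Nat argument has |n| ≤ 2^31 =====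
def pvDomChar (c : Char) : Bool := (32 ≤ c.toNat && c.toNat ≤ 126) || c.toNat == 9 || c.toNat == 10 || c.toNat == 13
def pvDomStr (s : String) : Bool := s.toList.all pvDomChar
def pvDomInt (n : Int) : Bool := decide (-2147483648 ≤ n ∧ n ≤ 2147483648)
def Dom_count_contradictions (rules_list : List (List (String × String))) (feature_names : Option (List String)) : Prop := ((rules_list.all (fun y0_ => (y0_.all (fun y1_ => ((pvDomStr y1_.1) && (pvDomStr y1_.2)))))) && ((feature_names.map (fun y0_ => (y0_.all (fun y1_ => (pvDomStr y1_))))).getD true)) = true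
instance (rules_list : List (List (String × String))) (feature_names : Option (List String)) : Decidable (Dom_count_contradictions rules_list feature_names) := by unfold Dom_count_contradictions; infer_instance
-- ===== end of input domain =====

-- B replaces A's feature-by-feature rescans of rules_list with one pass building a
-- feature -> set-of-directions dict, then counts entries with more than one direction (alternative algorithm; asymptotically fewer scans).


-- ===== PORT A =====
def count_contradictions (rules_list : List (List (String × String))) (feature_names : Option (List String)) : Int :=
  let names : List String :=
    match feature_names with
    | none =>
        PySem.List.sorted
          (PySem.Set.ofList (rules_list.flatMap (fun r => (PySem.Dict.ofList r).keys)))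
          (fun x => x) false
    | some ns => ns
  let contradictory : PySem.Set String :=
    names.foldl (fun s feat =>
      let dirs : List (Option String) :=
        (rules_list.filter (fun r => (PySem.Dict.ofList r).contains feat)).map
          (fun r => (PySem.Dict.ofList r).get? feat)
      if 1 < (PySem.Set.ofList dirs).length then PySem.Set.add s feat else s)
      PySem.Set.empty
  (contradictory.length : Int)

-- ===== PORT B =====
-- feature -> set of directions seen, one pass over every rule entry (B's `dirs` dict)
def pvDirsDict (rules_list : List (List (String × String))) : PySem.Dict String (PySem.Set String) :=
  rules_list.foldl
    (fun d r =>
      ((PySem.Dict.ofList r).items).foldl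
        (fun d p => d.modify p.1 PySem.Set.empty (fun s => PySem.Set.add s p.2)) d)
    PySem.Dict.empty

def count_contradictions_alt (rules_list : List (List (String × String))) (feature_names : Option (List String)) : Int :=
  let dirs := pvDirsDict rules_list
  match feature_names with
  | none =>
      dirs.values.foldl (fun acc s => if 1 < s.length then acc + 1 else acc) (0 : Int)
  | some ns =>
      (PySem.Set.ofList ns).foldl
        (fun acc feat => if 1 < (dirs.getD feat PySem.Set.empty).length then acc + 1 else acc)
        (0 : Int)

-- ===== PRECONDITION & SPEC =====
def Spec_count_contradictions (rules_list : List (List (String × String))) (feature_names : Option (List String)) (out : Int) : Prop := out = count_contradictions_alt rules_list feature_names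
instance (rules_list : List (List (String × String))) (feature_names : Option (List String)) (out : Int) : Decidable (Spec_count_contradictions rules_list feature_names out) := by unfold Spec_count_contradictions; infer_instance

-- ===== CLAIM (what is proved, stated in full; the proofs are below) =====
def Claim_equal_count_contradictions : Prop := ∀ (rules_list : List (List (String × String))) (feature_names : Option (List String)), Dom_count_contradictions rules_list feature_names → Spec_count_contradictions rules_list feature_names (count_contradictions rules_list feature_names)

-- ===== LEMMAS AND PROOFS =====

-- A's per-feature direction list, with the values themselves rather than Options
def pvVals (rules_list : List (List (String × String))) (feat : String) : List String :=
  (rules_list.filter (fun r => (PySem.Dict.ofList r).contains feat)).map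
    (fun r => (PySem.Dict.ofList r).getD feat "")

lemma pv_filter_key_of_not_mem {ν : Type} (l : List (String × ν)) (k : String)
    (h : k ∉ l.map (·.1)) : l.filter (fun p => p.1 == k) = [] := by
  induction l with
  | nil => rfl
  | cons q l ih =>
      simp only [List.map_cons, List.mem_cons] at h
      push Not at h
      simp only [List.filter_cons]
      rw [if_neg (by simpa using (Ne.symm h.1)), ih h.2]

lemma pv_filter_key_of_mem {ν : Type} (l : List (String × ν)) (k : String) (v : ν)
    (hnd : (l.map (·.1)).Nodup) (hmem : (k, v) ∈ l) :
    l.filter (fun p => p.1 == k) = [(k, v)] := by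
  induction l with
  | nil => cases hmem
  | cons q l ih =>
      simp only [List.map_cons, List.nodup_cons] at hnd
      rcases List.mem_cons.mp hmem with h | h
      · subst h
        simp [pv_filter_key_of_not_mem l k hnd.1]
      · have hq : q.1 ≠ k := by
          intro he
          exact hnd.1 (he ▸ (List.mem_map.mpr ⟨(k, v), h, rfl⟩))
        simp only [List.filter_cons]
        rw [if_neg (by simpa using hq), ih hnd.2 h]

lemma pv_items_filter_key {ν : Type} (d : PySem.Dict String ν) (k : String)
    (hnd : d.keys.Nodup) :
    d.items.filter (fun p => p.1 == k) =
      (match d.get? k with | some v => [(k, v)] | none => []) := by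
  cases hv : d.get? k with
  | none =>
      have hk : k ∉ d.keys := (PySem.Dict.get?_eq_none_iff_not_mem_keys d k).mp hv
      exact pv_filter_key_of_not_mem _ _ (by simpa [PySem.Dict.keys] using hk)
  | some v =>
      have hmem : (k, v) ∈ d.items := (PySem.Dict.get?_eq_some_iff_mem_items d k v hnd).mp hv
      exact pv_filter_key_of_mem _ _ _ (by simpa [PySem.Dict.keys] using hnd) hmem

lemma pv_getD_inner (l : List (String × String)) (d : PySem.Dict String (PySem.Set String)) (feat : String) :
    ((l.foldl (fun d p => d.modify p.1 PySem.Set.empty (fun s => PySem.Set.add s p.2)) d).getD feat PySem.Set.empty)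
      = PySem.Set.update (d.getD feat PySem.Set.empty) ((l.filter (fun p => p.1 == feat)).map (·.2)) := by
  induction l generalizing d with
  | nil => rfl
  | cons p l ih =>
      simp only [List.foldl_cons, List.filter_cons]
      by_cases hp : p.1 = feat
      · rw [if_pos (by simpa using hp), List.map_cons, PySem.Set.update_cons, ih,
          PySem.Dict.getD_modify, if_pos hp.symm, hp]
      · rw [if_neg (by simpa using hp), ih, PySem.Dict.getD_modify, if_neg (Ne.symm hp)]

lemma pv_getD_ruleStep (r : List (String × String)) (d : PySem.Dict String (PySem.Set String)) (feat : String) :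
    (((PySem.Dict.ofList r).items).foldl
        (fun d p => d.modify p.1 PySem.Set.empty (fun s => PySem.Set.add s p.2)) d).getD feat PySem.Set.empty
      = (if (PySem.Dict.ofList r).contains feat then
          PySem.Set.add (d.getD feat PySem.Set.empty) ((PySem.Dict.ofList r).getD feat "")
        else d.getD feat PySem.Set.empty) := by
  rw [pv_getD_inner, pv_items_filter_key _ _ (PySem.Dict.nodup_keys_ofList r)]
  cases hv : (PySem.Dict.ofList r).get? feat with
  | none =>
      rw [PySem.Dict.contains_eq_isSome_get?, hv]
      rfl
  | some v =>
      rw [PySem.Dict.contains_eq_isSome_get?, hv,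
        PySem.Dict.getD_of_get?_eq_some _ _ hv]
      rfl

lemma pv_getD_pvDirs_aux (rules : List (List (String × String)))
    (d : PySem.Dict String (PySem.Set String)) (feat : String) :
    ((rules.foldl
        (fun d r => ((PySem.Dict.ofList r).items).foldl
          (fun d p => d.modify p.1 PySem.Set.empty (fun s => PySem.Set.add s p.2)) d) d).getD feat PySem.Set.empty)
      = PySem.Set.update (d.getD feat PySem.Set.empty) (pvVals rules feat) := by
  induction rules generalizing d with
  | nil => rfl
  | cons r rules ih =>
      simp only [List.foldl_cons, pvVals, List.filter_cons]
      rw [ih]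
      by_cases hc : (PySem.Dict.ofList r).contains feat
      · rw [if_pos (by simpa using hc), List.map_cons, PySem.Set.update_cons,
          pv_getD_ruleStep, if_pos hc]
        rfl
      · rw [if_neg (by simpa using hc), pv_getD_ruleStep, if_neg hc]
        rfl

lemma pv_getD_pvDirs (rules : List (List (String × String))) (feat : String) :
    (pvDirsDict rules).getD feat PySem.Set.empty = PySem.Set.ofList (pvVals rules feat) := by
  rw [pvDirsDict, pv_getD_pvDirs_aux]
  rw [show (PySem.Dict.empty : PySem.Dict String (PySem.Set String)).getD feat PySem.Set.empty = PySem.Set.empty from rfl]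
  exact PySem.Set.update_nil_left _

lemma pv_foldl_add_some (l : List String) (s : PySem.Set String) :
    l.foldl (fun s x => PySem.Set.add s (some x)) (s.map some) = (l.foldl PySem.Set.add s).map some := by
  induction l generalizing s with
  | nil => rfl
  | cons x l ih =>
      have hadd : PySem.Set.add (s.map some) (some x) = (PySem.Set.add s x).map some := by
        rw [PySem.Set.add_eq_ite, PySem.Set.add_eq_ite]
        by_cases hx : x ∈ s
        · rw [if_pos (List.mem_map.mpr ⟨x, hx, rfl⟩), if_pos hx]
        · rw [if_neg (by simp [hx]), if_neg hx, List.map_append]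
          rfl
      simp only [List.foldl_cons, hadd, ih]

lemma pv_ofList_map_some (l : List String) :
    PySem.Set.ofList (l.map some) = (PySem.Set.ofList l).map some := by
  rw [PySem.Set.ofList_eq_foldl, PySem.Set.ofList_eq_foldl, List.foldl_map]
  exact pv_foldl_add_some l []

lemma pv_dirsA_eq (rules : List (List (String × String))) (feat : String) :
    (rules.filter (fun r => (PySem.Dict.ofList r).contains feat)).map
        (fun r => (PySem.Dict.ofList r).get? feat)
      = (pvVals rules feat).map some := by
  rw [pvVals, List.map_map]
  refine List.map_congr_left (fun r hr => ?_)
  have hc : (PySem.Dict.ofList r).contains feat := (List.mem_filter.mp hr).2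
  rw [PySem.Dict.contains_eq_isSome_get?] at hc
  cases hv : (PySem.Dict.ofList r).get? feat with
  | none => rw [hv] at hc; cases hc
  | some v => simp [PySem.Dict.getD_of_get?_eq_some _ _ hv]

-- A's per-feature test agrees with a lookup in B's dict
lemma pv_cond_eq (rules : List (List (String × String))) (feat : String) :
    (PySem.Set.ofList ((rules.filter (fun r => (PySem.Dict.ofList r).contains feat)).map
        (fun r => (PySem.Dict.ofList r).get? feat))).length
      = ((pvDirsDict rules).getD feat PySem.Set.empty).length := by
  rw [pv_dirsA_eq, pv_ofList_map_some, List.length_map, pv_getD_pvDirs]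

-- keys of B's dict = first occurrences of all features, in order
lemma pv_keys_pvDirs_aux (rules : List (List (String × String)))
    (d : PySem.Dict String (PySem.Set String)) :
    ((rules.foldl
        (fun d r => ((PySem.Dict.ofList r).items).foldl
          (fun d p => d.modify p.1 PySem.Set.empty (fun s => PySem.Set.add s p.2)) d) d).keys)
      = PySem.Set.update d.keys (rules.flatMap (fun r => (PySem.Dict.ofList r).keys)) := by
  induction rules generalizing d with
  | nil => rfl
  | cons r rules ih =>
      simp only [List.foldl_cons, List.flatMap_cons]
      rw [ih, PySem.Set.update_append,
        PySem.Dict.keys_foldl_modify_key ((PySem.Dict.ofList r).items) (·.1)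
          PySem.Set.empty (fun _ p => fun s => PySem.Set.add s p.2) d]
      rfl

lemma pv_keys_pvDirs (rules : List (List (String × String))) :
    (pvDirsDict rules).keys
      = PySem.Set.ofList (rules.flatMap (fun r => (PySem.Dict.ofList r).keys)) := by
  rw [pvDirsDict, pv_keys_pvDirs_aux]
  exact PySem.Set.update_nil_left _

-- the common counting core: number of condition-satisfying distinct names
lemma pv_count_core (names M : List String) (c : String → Bool)
    (hM : M.Nodup) (hmem : ∀ x, x ∈ names ↔ x ∈ M) :
    (PySem.Set.ofList (names.filter c)).length = List.countP c M := by
  have h1 : (PySem.Set.ofList (names.filter c)).Perm (M.filter c) := by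
    rw [List.perm_ext_iff_of_nodup (PySem.Set.nodup_ofList _) (hM.filter c)]
    intro a
    rw [PySem.Set.mem_ofList, List.mem_filter, List.mem_filter, hmem a]
  rw [h1.length_eq, List.countP_eq_length_filter]

theorem pv_main (rules_list : List (List (String × String))) (feature_names : Option (List String)) :
    count_contradictions rules_list feature_names = count_contradictions_alt rules_list feature_names := by
  have hfun : ∀ (s : PySem.Set String) (feat : String),
      (let dirs : List (Option String) :=
        (rules_list.filter (fun r => (PySem.Dict.ofList r).contains feat)).map
          (fun r => (PySem.Dict.ofList r).get? feat)
       if 1 < (PySem.Set.ofList dirs).length then PySem.Set.add s feat else s)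
      = (if (fun feat => decide (1 < ((pvDirsDict rules_list).getD feat PySem.Set.empty).length)) feat
          then PySem.Set.add s feat else s) := by
    intro s feat
    simp only [pv_cond_eq rules_list feat, decide_eq_true_eq]
  set c : String → Bool :=
    fun feat => decide (1 < ((pvDirsDict rules_list).getD feat PySem.Set.empty).length) with hc
  have hA : ∀ names : List String,
      (names.foldl (fun s feat =>
        let dirs : List (Option String) :=
          (rules_list.filter (fun r => (PySem.Dict.ofList r).contains feat)).map
            (fun r => (PySem.Dict.ofList r).get? feat)
        if 1 < (PySem.Set.ofList dirs).length then PySem.Set.add s feat else s)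
        PySem.Set.empty)
      = PySem.Set.ofList (names.filter c) := by
    intro names
    have : (names.foldl (fun s feat =>
        let dirs : List (Option String) :=
          (rules_list.filter (fun r => (PySem.Dict.ofList r).contains feat)).map
            (fun r => (PySem.Dict.ofList r).get? feat)
        if 1 < (PySem.Set.ofList dirs).length then PySem.Set.add s feat else s)
        PySem.Set.empty)
        = names.foldl (fun s feat => if c feat then PySem.Set.add s feat else s) PySem.Set.empty := by
      congr 1
      funext s feat
      exact hfun s feat
    rw [this, ← List.foldl_filter, PySem.Set.ofList_eq_foldl]
    rfl
  cases feature_names with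
  | some ns =>
      show (_ : Int) = _
      simp only [count_contradictions, count_contradictions_alt, hA]
      rw [show (fun (acc : Int) feat =>
            if 1 < ((pvDirsDict rules_list).getD feat PySem.Set.empty).length then acc + 1 else acc)
          = (fun (acc : Int) feat => if c feat then acc + 1 else acc) by
            funext acc feat; rw [hc]; simp]
      rw [PySem.List.foldl_count_if c (PySem.Set.ofList ns) 0]
      have := pv_count_core ns (PySem.Set.ofList ns) c (PySem.Set.nodup_ofList ns)
        (fun x => by simp [PySem.Set.mem_ofList])
      rw [this]
      ring
  | none =>
      show (_ : Int) = _
      simp only [count_contradictions, count_contradictions_alt, hA]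
      set K := rules_list.flatMap (fun r => (PySem.Dict.ofList r).keys) with hK
      set names := PySem.List.sorted (PySem.Set.ofList K) (fun x => x) false with hnames
      have hperm : names.Perm (PySem.Set.ofList K) := PySem.List.sorted_perm _ _ _
      have hvals : (pvDirsDict rules_list).values
          = (pvDirsDict rules_list).keys.map
              (fun k => (pvDirsDict rules_list).getD k PySem.Set.empty) := by
        refine PySem.Dict.values_eq_map_keys _ ?_ _
        rw [pv_keys_pvDirs]
        exact PySem.Set.nodup_ofList _
      rw [hvals, List.foldl_map]
      rw [show (fun (acc : Int) k =>
            if 1 < ((pvDirsDict rules_list).getD k PySem.Set.empty).length then acc + 1 else acc)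
          = (fun (acc : Int) k => if c k then acc + 1 else acc) by
            funext acc k; rw [hc]; simp]
      rw [PySem.List.foldl_count_if c _ 0, pv_keys_pvDirs]
      have := pv_count_core names (PySem.Set.ofList K) c
        (PySem.Set.nodup_ofList K)
        (fun x => hperm.mem_iff)
      rw [this]
      ring

-- ===== VERDICT (by name: the statement is the Claim_ definition above) =====
theorem count_contradictions_spec : Claim_equal_count_contradictions := by
  intro rules_list feature_names _
  show count_contradictions rules_list feature_names = count_contradictions_alt rules_list feature_names
  exact pv_main rules_list feature_names
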